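-- pv_equiv track=rewrite | github.com/mouredev/retos-programacion-2023 | Retos/Reto #4 - PRIMO, FIBONACCI Y PAR [Media]/python/The-Asintota.py | check
-- ===== SOURCE A (Python) =====
-- def check(num):
--
--     if num < 0 or type(num) == type(1.0):
--         return 'El numero debe ser un entenero positovo.'
--
--     resultado = ''
--
--     #numero par o impar
--     if num % 2 == 0:
--         resultado += 'El nunero {} es par, '.format(num)
--
--     else:
--         resultado += 'El numero {} es impar, '.format(num)
--
--     #numero de fibbonaci
--     pos_0 = 0
--     pos_1 = 1
--     fibbo = False
--
--     while pos_0 <= num: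
--         if pos_0 == num:
--             fibbo = True
--
--         suma = pos_0 + pos_1
--         pos_0 = pos_1
--         pos_1 = suma
--
--     if fibbo == True:
--         resultado += 'pertenece a la sucesion de fibbonaci y '
--
--     else:
--         resultado += 'no pertenece a la sucesion de fibbonaci y '
--
--     #numero primo
--     primo = True
--
--     if num == 2:
--         resultado += 'es primo.'
--
--     elif num == 1:
--         resultado += 'no es primo.'
--
--     else:
--         for n in range(2, num):
--             if num % n == 0:
--                 primo = False
--
--         if primo == True:
--             resultado += 'es primo.'
--
--         else:
--             resultado += 'no es primo.'
--
--     return resultado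
-- ===== SOURCE B (Python) =====
-- def _is_fib(a, b, n):
--     # walk the Fibonacci pairs until a catches up with n
--     if a >= n:
--         return a == n
--     return _is_fib(b, a + b, n)
--
--
-- def check(num):
--     if num < 0:
--         return 'El numero debe ser un entenero positovo.'
--
--     if num % 2 == 0:
--         resultado = 'El nunero {} es par, '.format(num)
--     else:
--         resultado = 'El numero {} es impar, '.format(num)
--
--     if _is_fib(0, 1, num):
--         resultado += 'pertenece a la sucesion de fibbonaci y '
--     else:
--         resultado += 'no pertenece a la sucesion de fibbonaci y '
--
--     if num == 2:
--         resultado += 'es primo.'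
--     elif num == 1:
--         resultado += 'no es primo.'
--     else:
--         primo = True
--         d = 2
--         while d * d <= num:
--             if num % d == 0:
--                 primo = False
--                 break
--             d += 1
--         resultado += 'es primo.' if primo else 'no es primo.'
--
--     return resultado
-- ===== Notes on version B (the rewrite author's own statement) =====
-- stated objective: faster
-- what changed: Primality is decided by trial division only up to the square root with an early break (instead of scanning every n in range(2,num) with no break), and the Fibonacci membership flag-latching while-loop is replaced by a recursive walk that stops as soon as the Fibonacci value reaches num; the strings are assembled from the chosen pieces.
import Mathlib
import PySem

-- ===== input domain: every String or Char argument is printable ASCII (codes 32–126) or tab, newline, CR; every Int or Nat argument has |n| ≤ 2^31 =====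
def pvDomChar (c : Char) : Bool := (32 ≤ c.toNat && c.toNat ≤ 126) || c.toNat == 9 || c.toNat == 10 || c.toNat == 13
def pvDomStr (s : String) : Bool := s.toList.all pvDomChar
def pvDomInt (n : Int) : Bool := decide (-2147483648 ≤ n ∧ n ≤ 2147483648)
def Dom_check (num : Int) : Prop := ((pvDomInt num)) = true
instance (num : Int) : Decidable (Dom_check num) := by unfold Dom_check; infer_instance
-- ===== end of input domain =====

-- B replaces A's O(num) primality scan by trial division up to the square root with an early
-- break, and A's flag-latching Fibonacci while-loop by a recursive walk that stops at num.

-- ===== PORT A =====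

-- A's fibonacci while-loop: latches fibbo when pos_0 == num, runs until pos_0 > num.
-- The Nat argument is only a fuel bound making the loop total; num+3 iterations always suffice.
def fibLoopA (fuel : Nat) (num pos0 pos1 : Int) (fib : Bool) : Bool :=
  match fuel with
  | 0 => fib
  | f + 1 =>
    if pos0 ≤ num then fibLoopA f num pos1 (pos0 + pos1) (fib || decide (pos0 = num))
    else fib

def check (num : Int) : String :=
  if num < 0 then "El numero debe ser un entenero positovo."
  else
    let resultado :=
      if PySem.Int.mod num 2 = 0 then "El nunero " ++ PySem.Int.toStr num ++ " es par, "
      else "El numero " ++ PySem.Int.toStr num ++ " es impar, "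
    let fibbo := fibLoopA (num + 3).toNat num 0 1 false
    let resultado :=
      if fibbo then resultado ++ "pertenece a la sucesion de fibbonaci y "
      else resultado ++ "no pertenece a la sucesion de fibbonaci y "
    if num = 2 then resultado ++ "es primo."
    else if num = 1 then resultado ++ "no es primo."
    else
      let primo := (PySem.List.pyRange 2 num 1).foldl
        (fun p n => if PySem.Int.mod num n = 0 then false else p) true
      if primo then resultado ++ "es primo." else resultado ++ "no es primo."

-- ===== PORT B =====

-- Source B's _is_fib: walk the Fibonacci pairs until a catches up with n (fuel = totality device).
def isFibB (fuel : Nat) (a b n : Int) : Bool :=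
  match fuel with
  | 0 => a == n
  | f + 1 => if n ≤ a then a == n else isFibB f b (a + b) n

-- Source B's trial-division while-loop: d from 2 while d*d <= num, early break on a divisor.
def primeLoopB (fuel : Nat) (num d : Int) : Bool :=
  match fuel with
  | 0 => true
  | f + 1 =>
    if d * d ≤ num then
      if PySem.Int.mod num d = 0 then false else primeLoopB f num (d + 1)
    else true

def check_alt (num : Int) : String :=
  if num < 0 then "El numero debe ser un entenero positovo."
  else
    let resultado :=
      if PySem.Int.mod num 2 = 0 then "El nunero " ++ PySem.Int.toStr num ++ " es par, "
      else "El numero " ++ PySem.Int.toStr num ++ " es impar, "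
    let resultado :=
      if isFibB (num + 3).toNat 0 1 num then resultado ++ "pertenece a la sucesion de fibbonaci y "
      else resultado ++ "no pertenece a la sucesion de fibbonaci y "
    if num = 2 then resultado ++ "es primo."
    else if num = 1 then resultado ++ "no es primo."
    else
      if primeLoopB (num + 1).toNat num 2 then resultado ++ "es primo."
      else resultado ++ "no es primo."

-- ===== PRECONDITION & SPEC =====
def Spec_check (num : Int) (out : String) : Prop := out = check_alt num
instance (num : Int) (out : String) : Decidable (Spec_check num out) := by unfold Spec_check; infer_instance

-- ===== CLAIM (what is proved, stated in full; the proofs are below) =====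
def Claim_equal_check : Prop := ∀ (num : Int), Dom_check num → Spec_check num (check num)

-- ===== LEMMAS AND PROOFS =====

-- once the flag is latched, A's fibonacci loop returns true
lemma fibLoopA_true (fuel : Nat) : ∀ (num a b : Int), fibLoopA fuel num a b true = true := by
  induction fuel with
  | zero => intro num a b; rfl
  | succ f ih =>
    intro num a b
    rw [fibLoopA]
    by_cases h : a ≤ num
    · simp only [if_pos h, Bool.true_or]; exact ih num b (a + b)
    · simp [h]

-- A's latched loop equals B's early-stopping walk, given invariants of the (0,1) start
-- and enough fuel for A's loop to finish
lemma fibLoopA_eq_isFibB (fuel : Nat) :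
    ∀ (num a b : Int) (fib : Bool),
    0 ≤ a → 1 ≤ b → b ≤ 2 * a + 1 → (a < b ∨ (a = 1 ∧ b = 1)) →
    num + 2 - a + (if a < b then 0 else 1) + (if a ≤ 0 then 1 else 0) ≤ (fuel : Int) →
    fibLoopA fuel num a b fib = (fib || isFibB fuel a b num) := by
  induction fuel with
  | zero =>
    intro num a b fib h0 h1 h2 hd hf
    have : (a == num) = false := by
      simp only [beq_eq_false_iff_ne, ne_eq]
      split_ifs at hf <;> omega
    simp [fibLoopA, isFibB, this]
  | succ f ih =>
    intro num a b fib h0 h1 h2 hd hf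
    rw [fibLoopA, isFibB]
    by_cases hle : a ≤ num
    · rw [if_pos hle]
      by_cases heq : a = num
      · rw [if_pos (by omega : num ≤ a)]
        subst heq
        simp [fibLoopA_true]
      · rw [if_neg (by omega : ¬ num ≤ a)]
        have hrec := ih num b (a + b) fib (by omega) (by omega) (by omega)
          (by rcases hd with h | h <;> omega)
          (by split_ifs at hf ⊢ <;> omega)
        simpa [heq] using hrec
    · rw [if_neg hle, if_pos (by omega : num ≤ a)]
      have : (a == num) = false := by simp only [beq_eq_false_iff_ne, ne_eq]; omega
      simp [this]

-- A's no-break fold is a latched "all"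
lemma foldl_latch (num : Int) (l : List Int) (b : Bool) :
    l.foldl (fun p n => if PySem.Int.mod num n = 0 then false else p) b
      = (b && l.all (fun n => !(decide (PySem.Int.mod num n = 0)))) := by
  induction l generalizing b with
  | nil => simp
  | cons x l ih =>
    simp only [List.foldl_cons, List.all_cons, ih]
    by_cases hx : PySem.Int.mod num x = 0 <;> simp [hx]

-- B's sqrt loop decides "no divisor e ≥ d with e*e ≤ num", given enough fuel
lemma primeLoopB_iff (fuel : Nat) :
    ∀ (num d : Int), 1 ≤ d → num + 1 - d ≤ (fuel : Int) →
    (primeLoopB fuel num d = true ↔ ∀ e, d ≤ e → e * e ≤ num → ¬ (e ∣ num)) := by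
  induction fuel with
  | zero =>
    intro num d h1 hf
    refine ⟨fun _ => ?_, fun _ => rfl⟩
    intro e he hee hdv
    have : d ≤ d * d := by nlinarith
    have : d * d ≤ e * e := by nlinarith
    omega
  | succ f ih =>
    intro num d h1 hf
    rw [primeLoopB]
    by_cases hdd : d * d ≤ num
    · rw [if_pos hdd]
      by_cases hmod : PySem.Int.mod num d = 0
      · rw [if_pos hmod]
        rw [PySem.Int.mod_eq_zero_iff_dvd] at hmod
        exact ⟨fun h => by simp at h, fun hp => (hp d le_rfl hdd hmod).elim⟩
      · rw [if_neg hmod, ih num (d + 1) (by omega) (by omega)]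
        rw [PySem.Int.mod_eq_zero_iff_dvd] at hmod
        constructor
        · intro hp e he hee hdv
          rcases eq_or_lt_of_le he with rfl | hlt
          · exact hmod hdv
          · exact hp e (by omega) hee hdv
        · intro hp e he hee hdv
          exact hp e (by omega) hee hdv
    · rw [if_neg hdd]
      simp only [true_iff]
      intro e he hee hdv
      have : d * d ≤ e * e := by nlinarith
      omega

-- range version ↔ sqrt version of "has no nontrivial divisor"
lemma range_iff_sqrt (num : Int) :
    (∀ n, 2 ≤ n → n < num → ¬ (n ∣ num)) ↔ (∀ e, 2 ≤ e → e * e ≤ num → ¬ (e ∣ num)) := by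
  constructor
  · intro hp e he hee hdv
    have : e < num := by nlinarith
    exact hp e he this hdv
  · intro hp n hn hlt hdv
    rcases hdv with ⟨c, hc⟩
    have hc2 : 2 ≤ c := by nlinarith
    by_cases hnn : n * n ≤ num
    · exact hp n hn hnn ⟨c, hc⟩
    · have hcn : c < n := by nlinarith
      have hcc : c * c ≤ num := by nlinarith
      exact hp c hc2 hcc ⟨n, by linarith [mul_comm n c]⟩

-- A's primality fold agrees with B's sqrt trial division
lemma primoA_eq_primoB (num : Int) :
    (PySem.List.pyRange 2 num 1).foldl
        (fun p n => if PySem.Int.mod num n = 0 then false else p) true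
      = primeLoopB (num + 1).toNat num 2 := by
  rw [foldl_latch, Bool.eq_iff_iff]
  have hA : ((PySem.List.pyRange 2 num 1).all
      (fun n => !(decide (PySem.Int.mod num n = 0))) = true)
      ↔ ∀ n, 2 ≤ n → n < num → ¬ (n ∣ num) := by
    simp only [List.all_eq_true, PySem.List.mem_pyRange_one,
      Bool.not_eq_eq_eq_not, Bool.not_true, decide_eq_false_iff_not,
      PySem.Int.mod_eq_zero_iff_dvd]
    constructor
    · intro hp n h1 h2
      exact hp n ⟨h1, h2⟩
    · intro hp n hn
      exact hp n hn.1 hn.2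
  rw [Bool.true_and, hA, primeLoopB_iff (num + 1).toNat num 2 (by omega) (by omega)]
  exact range_iff_sqrt num

-- ===== VERDICT (by name: the statement is the Claim_ definition above) =====
theorem check_spec : Claim_equal_check := by
  intro num _
  unfold Spec_check check check_alt
  by_cases hneg : num < 0
  · simp [hneg]
  · simp only [if_neg hneg]
    rw [fibLoopA_eq_isFibB (num + 3).toNat num 0 1 false (by omega) (by omega) (by omega)
      (by omega) (by split_ifs <;> omega)]
    rw [Bool.false_or, primoA_eq_primoB]
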